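-- pv_equiv track=rewrite | github.com/wonlee2019/konke-browser-central | xpcom/ds/tools/make_dafsa.py | parse_gperf
-- ===== SOURCE A (Python) =====
-- class InputError(Exception):
--     """Exception raised for errors in the input file."""
--
-- def parse_gperf(infile):
--     """Parses gperf file and extract strings and return code"""
--     lines = [line.strip() for line in infile]
--
--     # Extract the preamble.
--     first_delimeter = lines.index("%%")
--     preamble = "\n".join(lines[0:first_delimeter])
--
--     # Extract strings after the first '%%' and before the second '%%'.
--     begin = first_delimeter + 1
--     end = lines.index("%%", begin)
--     lines = lines[begin:end]
--     for line in lines: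
--         if line[-3:-1] != ", ":
--             raise InputError('Expected "domainname, <digit>", found "%s"' % line)
--         # Technically the DAFSA format could support return values in range [0-31],
--         # but the values below are the only with a defined meaning.
--         if line[-1] not in "0124":
--             raise InputError(
--                 'Expected value to be one of {0,1,2,4}, found "%s"' % line[-1]
--             )
--     return (preamble, [line[:-3] + line[-1] for line in lines])
-- ===== SOURCE B (Python) =====
-- class InputError(Exception):
--     """Exception raised for errors in the input file."""
--
-- def parse_gperf(infile):
--     """Parses gperf file and extract strings and return code"""
--     preamble_lines = []
--     body = []
--     phase = 0
--     for raw in infile: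
--         line = raw.strip()
--         if line == "%%":
--             phase += 1
--             if phase == 2:
--                 break
--         elif phase == 0:
--             preamble_lines.append(line)
--         else:
--             body.append(line)
--     if phase < 2:
--         raise InputError("missing '%%' delimiter")
--     for line in body:
--         if line[-3:-1] != ", ":
--             raise InputError('Expected "domainname, <digit>", found "%s"' % line)
--         if line[-1] not in "0124":
--             raise InputError(
--                 'Expected value to be one of {0,1,2,4}, found "%s"' % line[-1]
--             )
--     return ("\n".join(preamble_lines), [line[:-3] + line[-1] for line in body])
-- ===== Notes on version B (the rewrite author's own statement) =====
-- stated objective: alternative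
-- what changed: Replaces A's two list.index scans plus slicing of a pre-stripped copy by a single stateful pass over the raw lines that strips each line once and dispatches on a phase counter, validating and transforming the collected body afterwards; Pre_ excludes the inputs on which A raises (missing '%%' delimiters or a malformed body line), where B also raises.
import Mathlib
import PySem

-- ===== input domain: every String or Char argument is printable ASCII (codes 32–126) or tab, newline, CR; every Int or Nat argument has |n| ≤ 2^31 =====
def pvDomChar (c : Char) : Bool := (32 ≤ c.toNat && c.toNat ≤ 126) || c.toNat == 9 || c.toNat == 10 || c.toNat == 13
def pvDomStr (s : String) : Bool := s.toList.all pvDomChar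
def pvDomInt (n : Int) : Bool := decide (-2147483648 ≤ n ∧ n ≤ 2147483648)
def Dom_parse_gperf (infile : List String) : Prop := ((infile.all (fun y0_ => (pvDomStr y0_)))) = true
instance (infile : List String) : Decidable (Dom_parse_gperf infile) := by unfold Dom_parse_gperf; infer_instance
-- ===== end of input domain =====

-- B: one stateful pass over the raw lines (strip, phase counter) instead of A's two index scans
-- over a pre-stripped copy plus slicing; same validation and transform on the collected body.

-- shared per-line validation (both Pythons contain this loop body verbatim):
-- 'line[-3:-1] != ", "' raises, then 'line[-1] not in "0124"' raises
def gpOk (line : String) : Bool :=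
  if PySem.Chars.slice line.toList (some (-3)) (some (-1)) ≠ [',', ' '] then false
  else
    match PySem.List.pyGet? line.toList (-1) with
    | some c => PySem.Chars.isIn [c] "0124".toList
    | none => false

-- shared transform 'line[:-3] + line[-1]' (line[-1] total via getD; inputs where it
-- would raise are excluded by gpOk, hence by Pre_)
def gpTf (line : String) : String :=
  String.ofList (PySem.Chars.slice line.toList none (some (-3)) ++
    (match PySem.List.pyGet? line.toList (-1) with | some c => [c] | none => []))

-- ===== PORT A =====
def parse_gperf (infile : List String) : String × List String :=
  let lines := infile.map PySem.Str.strip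
  match PySem.List.index? lines "%%" with
  | none => ("", [])          -- Python: ValueError (excluded by Pre_)
  | some fd =>
    let preamble := PySem.Str.join "\n" (PySem.List.slice lines (some 0) (some (fd : Int)))
    let b := fd + 1
    match PySem.List.index? (lines.drop b) "%%" with
    | none => ("", [])        -- Python: ValueError (excluded by Pre_)
    | some off =>
      let body := PySem.List.slice lines (some (b : Int)) (some ((b : Int) + (off : Int)))
      if body.all gpOk then (preamble, body.map gpTf)
      else ("", [])           -- Python: InputError (excluded by Pre_)

-- ===== PORT B =====
-- the phase-1 part of B's loop: collect stripped body lines until a stripped "%%"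
def altBody : List String → List String → Option (List String)
  | [], _ => none             -- Python: InputError (excluded by Pre_)
  | raw :: rest, acc =>
    let line := PySem.Str.strip raw
    if line = "%%" then some acc else altBody rest (acc ++ [line])

-- the phase-0 part of B's loop: collect stripped preamble lines until a stripped "%%"
def altPre : List String → List String → Option (List String × List String)
  | [], _ => none             -- Python: InputError (excluded by Pre_)
  | raw :: rest, acc =>
    let line := PySem.Str.strip raw
    if line = "%%" then (altBody rest []).map (fun b => (acc, b))
    else altPre rest (acc ++ [line])

def parse_gperf_alt (infile : List String) : String × List String :=
  match altPre infile [] with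
  | none => ("", [])          -- Python: InputError (excluded by Pre_)
  | some (pre, body) =>
    if body.all gpOk then (PySem.Str.join "\n" pre, body.map gpTf)
    else ("", [])             -- Python: InputError (excluded by Pre_)

-- ===== PRECONDITION & SPEC =====
-- Pre_ excludes exactly the inputs on which both programs raise: no first "%%" among the
-- stripped lines, no second "%%" after it, or a body line failing either validation check.
def Pre_parse_gperf (infile : List String) : Prop :=
  let ls := infile.map PySem.Str.strip
  ls.dropWhile (· ≠ "%%") ≠ [] ∧
  (ls.dropWhile (· ≠ "%%")).tail.dropWhile (· ≠ "%%") ≠ [] ∧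
  ∀ l ∈ (ls.dropWhile (· ≠ "%%")).tail.takeWhile (· ≠ "%%"), gpOk l = true
instance (infile : List String) : Decidable (Pre_parse_gperf infile) := by
  unfold Pre_parse_gperf; infer_instance

def pvWitness_parse_gperf : List String := ["key", " %%", "foo.com, 1", "bar, 4 ", "%%", "rest"]

def Spec_parse_gperf (infile : List String) (out : String × List String) : Prop := out = parse_gperf_alt infile
instance (infile : List String) (out : String × List String) : Decidable (Spec_parse_gperf infile out) := by unfold Spec_parse_gperf; infer_instance

-- ===== CLAIM (what is proved, stated in full; the proofs are below) =====
def Claim_equal_parse_gperf : Prop := ∀ (infile : List String), Dom_parse_gperf infile → Pre_parse_gperf infile → Spec_parse_gperf infile (parse_gperf infile)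

-- ===== LEMMAS AND PROOFS =====

theorem index?_of_dropWhile_ne_nil {α : Type} [DecidableEq α] (v : α) :
    ∀ (xs : List α), xs.dropWhile (· ≠ v) ≠ [] →
      PySem.List.index? xs v = some (xs.takeWhile (· ≠ v)).length := by
  intro xs
  induction xs with
  | nil => simp
  | cons x t ih =>
    intro h
    by_cases hx : x = v
    · subst hx
      rw [PySem.List.index?_cons_self]
      simp [List.takeWhile_cons]
    · rw [PySem.List.index?_cons_of_ne _ hx]
      have h' : t.dropWhile (· ≠ v) ≠ [] := by
        simpa [List.dropWhile_cons, hx] using h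
      rw [ih h']
      simp [List.takeWhile_cons, hx]

theorem take_takeWhile_length {α : Type} (p : α → Bool) (xs : List α) :
    xs.take (xs.takeWhile p).length = xs.takeWhile p := by
  induction xs with
  | nil => simp
  | cons x t ih =>
    by_cases hx : p x = true
    · simp [List.takeWhile_cons, hx, ih]
    · simp [List.takeWhile_cons, hx]

theorem drop_takeWhile_length_succ {α : Type} (p : α → Bool) (xs : List α) :
    xs.drop ((xs.takeWhile p).length + 1) = (xs.dropWhile p).tail := by
  induction xs with
  | nil => simp
  | cons x t ih =>
    by_cases hx : p x = true
    · simp [List.takeWhile_cons, List.dropWhile_cons, hx, ih]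
    · simp [List.takeWhile_cons, List.dropWhile_cons, hx]

-- altBody collects exactly the takeWhile of the stripped remainder, provided a "%%" exists
theorem altBody_spec : ∀ (raws acc : List String),
    altBody raws acc =
      (if (raws.map PySem.Str.strip).dropWhile (· ≠ "%%") = [] then none
       else some (acc ++ (raws.map PySem.Str.strip).takeWhile (· ≠ "%%"))) := by
  intro raws
  induction raws with
  | nil => intro acc; simp [altBody]
  | cons r t ih =>
    intro acc
    by_cases hr : PySem.Str.strip r = "%%"
    · simp [altBody, hr, List.dropWhile_cons, List.takeWhile_cons]
    · rw [show altBody (r :: t) acc = altBody t (acc ++ [PySem.Str.strip r]) from by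
        simp [altBody, hr]]
      rw [ih]
      by_cases h2 : (t.map PySem.Str.strip).dropWhile (· ≠ "%%") = [] <;>
        simp [h2, hr, List.dropWhile_cons, List.takeWhile_cons]

theorem altPre_spec : ∀ (raws acc : List String),
    altPre raws acc =
      (let ls := raws.map PySem.Str.strip
       if ls.dropWhile (· ≠ "%%") = [] then none
       else if (ls.dropWhile (· ≠ "%%")).tail.dropWhile (· ≠ "%%") = [] then none
       else some (acc ++ ls.takeWhile (· ≠ "%%"),
                  (ls.dropWhile (· ≠ "%%")).tail.takeWhile (· ≠ "%%"))) := by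
  intro raws
  induction raws with
  | nil => intro acc; simp [altPre]
  | cons r t ih =>
    intro acc
    by_cases hr : PySem.Str.strip r = "%%"
    · rw [show altPre (r :: t) acc = (altBody t []).map (fun b => (acc, b)) from by
        simp [altPre, hr]]
      rw [altBody_spec]
      simp only [List.map_cons, List.dropWhile_cons, List.takeWhile_cons, hr, ne_eq,
        not_true_eq_false, decide_false, Bool.false_eq_true, if_false, List.tail_cons]
      split_ifs <;> simp_all
    · rw [show altPre (r :: t) acc = altPre t (acc ++ [PySem.Str.strip r]) from by
        simp [altPre, hr]]
      rw [ih]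
      simp only [List.map_cons, List.dropWhile_cons, List.takeWhile_cons, ne_eq, hr,
        not_false_eq_true, decide_true, if_true]
      split_ifs <;> simp_all

-- ===== VERDICT (by name: the statement is the Claim_ definition above) =====
theorem parse_gperf_spec : Claim_equal_parse_gperf := by
  intro infile _hdom hpre
  obtain ⟨h1, h2, _h3⟩ := hpre
  unfold Spec_parse_gperf parse_gperf parse_gperf_alt
  set ls := infile.map PySem.Str.strip with hls
  rw [altPre_spec]
  simp only [← hls] at h1 h2 _h3 ⊢
  rw [if_neg h1, if_neg h2]
  rw [index?_of_dropWhile_ne_nil _ _ h1]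
  dsimp only
  have hdrop : ls.drop ((ls.takeWhile (· ≠ "%%")).length + 1) = (ls.dropWhile (· ≠ "%%")).tail :=
    drop_takeWhile_length_succ _ _
  rw [hdrop, index?_of_dropWhile_ne_nil _ _ h2]
  dsimp only
  rw [PySem.List.slice_natCast_add, hdrop, take_takeWhile_length,
    PySem.List.slice_zero_start, PySem.List.slice_to_natCast, take_takeWhile_length]
  simp
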